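-- pv_equiv track=rewrite | github.com/zcr734/MT_OF_SMOOTH_DQN | tools.py | plt_struct_yinyin
-- ===== SOURCE A (Python) =====
-- def plt_struct_yinyin(rho, thi):
--     dotlist=[]
--     t=0
--     for i in range(len(rho) - 1):
--         dot=[rho[i],t,t+thi[i]]
--         dotlist.append(dot)
--         t=t+thi[i]
--     dot=[rho[-1],t,t+10000]
--     dotlist.append(dot)
--     return dotlist
-- ===== SOURCE B (Python) =====
-- def plt_struct_yinyin(rho, thi):
--     n = len(rho)
--     # cumulative-offset table: starts[i] = total thickness before interval i
--     starts = [0]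
--     for x in thi[:n - 1]:
--         starts.append(starts[-1] + x)
--     return [[rho[i], starts[i], starts[i + 1]] for i in range(n - 1)] + \
--            [[rho[-1], starts[-1], starts[-1] + 10000]]
-- ===== Notes on version B (the rewrite author's own statement) =====
-- stated objective: alternative
-- what changed: B first builds an explicit cumulative-offset table (prefix sums of thi[:len(rho)-1] with a leading 0) and then constructs the intervals by pairing consecutive table entries, instead of A's single loop that fuses the running thickness sum with the interval building.
import Mathlib
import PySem

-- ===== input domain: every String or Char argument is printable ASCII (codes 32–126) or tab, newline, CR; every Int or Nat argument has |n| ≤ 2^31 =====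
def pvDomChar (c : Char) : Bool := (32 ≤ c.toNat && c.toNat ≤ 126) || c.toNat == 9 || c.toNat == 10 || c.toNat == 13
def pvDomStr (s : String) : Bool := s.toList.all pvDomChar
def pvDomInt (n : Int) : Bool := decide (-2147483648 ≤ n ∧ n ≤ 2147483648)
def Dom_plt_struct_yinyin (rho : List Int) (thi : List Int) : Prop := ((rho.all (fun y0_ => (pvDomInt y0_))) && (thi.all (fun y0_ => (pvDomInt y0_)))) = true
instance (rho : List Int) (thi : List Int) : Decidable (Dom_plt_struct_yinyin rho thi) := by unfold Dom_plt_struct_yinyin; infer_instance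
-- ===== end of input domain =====

-- B builds an explicit cumulative-offset table and pairs consecutive entries, instead of A's
-- fused running-sum loop (objective: alternative decomposition; return value only, no mutation).

-- ===== PORT A =====
def plt_struct_yinyin (rho : List Int) (thi : List Int) : List (List Int) :=
  let s := (PySem.List.pyRange 0 ((rho.length : Int) - 1) 1).foldl
    (fun (st : List (List Int) × Int) i =>
      (st.1 ++ [[PySem.List.pyGetD rho i 0, st.2, st.2 + PySem.List.pyGetD thi i 0]],
       st.2 + PySem.List.pyGetD thi i 0)) ([], 0)
  s.1 ++ [[PySem.List.pyGetD rho (-1) 0, s.2, s.2 + 10000]]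

-- ===== PORT B =====
def plt_struct_yinyin_alt (rho : List Int) (thi : List Int) : List (List Int) :=
  let n : Int := rho.length
  let starts : List Int :=
    (PySem.List.slice thi none (some (n - 1))).foldl
      (fun st x => st ++ [PySem.List.pyGetD st (-1) 0 + x]) [0]
  ((PySem.List.pyRange 0 (n - 1) 1).map (fun i =>
      [PySem.List.pyGetD rho i 0, PySem.List.pyGetD starts i 0,
       PySem.List.pyGetD starts (i + 1) 0]))
  ++ [[PySem.List.pyGetD rho (-1) 0, PySem.List.pyGetD starts (-1) 0,
       PySem.List.pyGetD starts (-1) 0 + 10000]]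

-- ===== PRECONDITION & SPEC =====
-- Pre_ excludes exactly the inputs where A raises IndexError: empty rho (rho[-1]) or
-- thi shorter than len(rho)-1 (thi[i] out of range).
def Pre_plt_struct_yinyin (rho : List Int) (thi : List Int) : Prop :=
  rho ≠ [] ∧ rho.length - 1 ≤ thi.length
instance (rho : List Int) (thi : List Int) : Decidable (Pre_plt_struct_yinyin rho thi) := by
  unfold Pre_plt_struct_yinyin; infer_instance
def pvWitness_plt_struct_yinyin : List Int × List Int := ([1, 2, 3], [10, 20])

def Spec_plt_struct_yinyin (rho : List Int) (thi : List Int) (out : List (List Int)) : Prop := out = plt_struct_yinyin_alt rho thi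
instance (rho : List Int) (thi : List Int) (out : List (List Int)) : Decidable (Spec_plt_struct_yinyin rho thi out) := by unfold Spec_plt_struct_yinyin; infer_instance

-- ===== CLAIM (what is proved, stated in full; the proofs are below) =====
def Claim_equal_plt_struct_yinyin : Prop := ∀ (rho : List Int) (thi : List Int), Dom_plt_struct_yinyin rho thi → Pre_plt_struct_yinyin rho thi → Spec_plt_struct_yinyin rho thi (plt_struct_yinyin rho thi)

-- ===== LEMMAS AND PROOFS =====

-- the prefix-sum table: pvPref l = [0, l[0], l[0]+l[1], …, sum l]
def pvPref (l : List Int) : List Int :=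
  (List.range (l.length + 1)).map (fun k => (l.take k).sum)

lemma pvPref_ne_nil (l : List Int) : pvPref l ≠ [] := by
  simp [pvPref, List.range_succ]

lemma pvPref_getLast (l : List Int) :
    (pvPref l).getLast (pvPref_ne_nil l) = l.sum := by
  have h : pvPref l = (List.range l.length).map (fun k => (l.take k).sum) ++ [l.sum] := by
    simp [pvPref, List.range_succ]
  have h2 : (pvPref l).getLast? = some l.sum := by
    rw [h]; simp
  rw [List.getLast?_eq_some_getLast (pvPref_ne_nil l)] at h2
  exact Option.some.inj h2

lemma pvPref_append_singleton (l : List Int) (x : Int) :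
    pvPref (l ++ [x]) = pvPref l ++ [l.sum + x] := by
  unfold pvPref
  rw [show (l ++ [x]).length + 1 = (l.length + 1) + 1 by simp,
      List.range_succ, List.map_append]
  congr 1
  · exact List.map_congr_left (fun k hk => by
      rw [List.take_append_of_le_length (by simpa using Nat.lt_succ_iff.mp (List.mem_range.mp hk))])
  · simp

lemma starts_eq_pvPref (l : List Int) :
    l.foldl (fun st x => st ++ [PySem.List.pyGetD st (-1) 0 + x]) [0] = pvPref l := by
  induction l using List.reverseRecOn with
  | nil => simp [pvPref]
  | append_singleton l x ih =>
      rw [List.foldl_append, List.foldl_cons, List.foldl_nil, ih,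
          PySem.List.pyGetD_neg_one (pvPref l) 0 (pvPref_ne_nil l),
          pvPref_getLast, pvPref_append_singleton]

lemma pvPref_getD (l : List Int) (k : Nat) (hk : k ≤ l.length) :
    (pvPref l).getD k 0 = (l.take k).sum := by
  unfold pvPref
  rw [List.getD_eq_getElem?_getD, List.getElem?_map, List.getElem?_range (by omega)]
  rfl

lemma A_fold (rho thi : List Int) (m : Nat) (hm : m ≤ thi.length) :
    (((List.range m).map (fun (k : Nat) => (k : Int))).foldl
      (fun (st : List (List Int) × Int) i =>
        (st.1 ++ [[PySem.List.pyGetD rho i 0, st.2, st.2 + PySem.List.pyGetD thi i 0]],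
         st.2 + PySem.List.pyGetD thi i 0)) ([], 0))
    = ((List.range m).map (fun (k : Nat) =>
         [PySem.List.pyGetD rho (k : Int) 0, (thi.take k).sum, (thi.take (k + 1)).sum]),
       (thi.take m).sum) := by
  induction m with
  | zero => simp
  | succ m ih =>
      have hm' : m ≤ thi.length := by omega
      have hget : PySem.List.pyGetD thi (m : Int) 0 = thi[m]'(by omega) := by
        rw [PySem.List.pyGetD_natCast, List.getD_eq_getElem?_getD, List.getElem?_eq_getElem (by omega)]
        rfl
      rw [List.range_succ, List.map_append, List.foldl_append, ih hm',
          List.map_append]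
      simp only [List.map_cons, List.map_nil, List.foldl_cons, List.foldl_nil, hget]
      rw [List.sum_take_succ thi m (by omega)]

lemma take_take_sum (thi : List Int) (m k : Nat) (hk : k ≤ m) :
    ((thi.take m).take k).sum = (thi.take k).sum := by
  rw [List.take_take, Nat.min_eq_left hk]

theorem plt_struct_yinyin_eq (rho thi : List Int) (h : Pre_plt_struct_yinyin rho thi) :
    plt_struct_yinyin rho thi = plt_struct_yinyin_alt rho thi := by
  obtain ⟨hne, hlen⟩ := h
  have hn : 1 ≤ rho.length := List.length_pos_iff.mpr hne
  have hcast : ((rho.length : Int) - 1) = ((rho.length - 1 : Nat) : Int) := by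
    push_cast [hn]; ring
  -- the slice is a plain take, with full length
  have hslice : PySem.List.slice thi none (some ((rho.length : Int) - 1)) =
      thi.take (rho.length - 1) := by
    rw [hcast, PySem.List.slice_to _ (by positivity)]
    norm_num
  have hT : (thi.take (rho.length - 1)).length = rho.length - 1 := by
    simp [Nat.min_eq_left hlen]
  unfold plt_struct_yinyin plt_struct_yinyin_alt
  simp only [hslice, starts_eq_pvPref]
  set T := thi.take (rho.length - 1) with hTdef
  rw [hcast, PySem.List.pyRange_one]
  simp only [zero_add, Int.toNat_natCast, Int.sub_zero]
  rw [A_fold rho thi (rho.length - 1) hlen]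
  congr 1
  · -- the per-interval lists agree
    rw [List.map_map]
    refine List.map_congr_left (fun k hk => ?_)
    have hk' : k < rho.length - 1 := List.mem_range.mp hk
    have h1 : PySem.List.pyGetD (pvPref T) (k : Int) 0 = (thi.take k).sum := by
      rw [PySem.List.pyGetD_natCast, pvPref_getD T k (by omega),
          take_take_sum thi _ k (by omega)]
    have h2 : PySem.List.pyGetD (pvPref T) ((k : Int) + 1) 0 = (thi.take (k + 1)).sum := by
      rw [show ((k : Int) + 1) = ((k + 1 : Nat) : Int) by push_cast; ring,
          PySem.List.pyGetD_natCast, pvPref_getD T (k + 1) (by omega),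
          take_take_sum thi _ (k + 1) (by omega)]
    simp [h1, h2]
  · -- the final interval agrees
    have hlast : PySem.List.pyGetD (pvPref T) (-1) 0 = (thi.take (rho.length - 1)).sum := by
      rw [PySem.List.pyGetD_neg_one (pvPref T) 0 (pvPref_ne_nil T), pvPref_getLast, hTdef]
    rw [hlast]

-- ===== VERDICT (by name: the statement is the Claim_ definition above) =====
theorem plt_struct_yinyin_spec : Claim_equal_plt_struct_yinyin := by
  intro rho thi _ hpre
  unfold Spec_plt_struct_yinyin
  exact plt_struct_yinyin_eq rho thi hpre
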